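-- pv_equiv track=rewrite | github.com/dvdthecoder/gitlab_pr_analysis | prtool/classifier.py | _label_support_stats
-- ===== SOURCE A (Python) =====
-- from typing import Any
--
-- def _label_support_stats(mr: dict[str, Any], final_type: str) -> tuple[int, int]:
--     labels = [str(l).strip().lower() for l in mr.get("labels", []) if str(l).strip()]
--     if not labels:
--         return 0, 0
--
--     support_map: dict[str, set[str]] = {
--         "feature": {"feature", "enhancement"},
--         "bugfix": {"bug", "bugfix", "fix", "defect", "hotfix"},
--         "refactor": {"refactor", "cleanup"},
--         "test-only": {"test", "tests"},
--         "docs-only": {"docs", "documentation"},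
--         "chore": {"chore", "maintenance", "dependencies", "deps"},
--         "perf-security": {"security", "perf", "performance", "snyk", "vulnerability"},
--         "infra": {"infra", "platform", "devops", "sre"},
--     }
--
--     support_aliases = support_map.get(final_type, set())
--     support = sum(1 for lbl in labels if lbl in support_aliases)
--
--     conflict = 0
--     for lbl in labels:
--         for k, aliases in support_map.items():
--             if k != final_type and lbl in aliases:
--                 conflict += 1
--                 break
--     return support, conflict
-- ===== SOURCE B (Python) =====
-- from typing import Any
--
-- def _label_support_stats(mr: dict[str, Any], final_type: str) -> tuple[int, int]:
--     support_map: dict[str, set[str]] = {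
--         "feature": {"feature", "enhancement"},
--         "bugfix": {"bug", "bugfix", "fix", "defect", "hotfix"},
--         "refactor": {"refactor", "cleanup"},
--         "test-only": {"test", "tests"},
--         "docs-only": {"docs", "documentation"},
--         "chore": {"chore", "maintenance", "dependencies", "deps"},
--         "perf-security": {"security", "perf", "performance", "snyk", "vulnerability"},
--         "infra": {"infra", "platform", "devops", "sre"},
--     }
--     # reverse index: alias -> category (alias sets are pairwise disjoint)
--     reverse = {alias: cat for cat, aliases in support_map.items() for alias in aliases}
--
--     labels = [str(l).strip().lower() for l in mr.get("labels", []) if str(l).strip()]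
--     support = 0
--     conflict = 0
--     for lbl in labels:
--         cat = reverse.get(lbl)
--         if cat == final_type:
--             support += 1
--         elif cat is not None:
--             conflict += 1
--     return support, conflict
-- ===== Notes on version B (the rewrite author's own statement) =====
-- stated objective: simpler
-- what changed: B builds a reverse index alias->category once and classifies each label with a single lookup in one pass, replacing A's separate support pass plus a per-label nested scan over all 8 alias sets with break.
import Mathlib
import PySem

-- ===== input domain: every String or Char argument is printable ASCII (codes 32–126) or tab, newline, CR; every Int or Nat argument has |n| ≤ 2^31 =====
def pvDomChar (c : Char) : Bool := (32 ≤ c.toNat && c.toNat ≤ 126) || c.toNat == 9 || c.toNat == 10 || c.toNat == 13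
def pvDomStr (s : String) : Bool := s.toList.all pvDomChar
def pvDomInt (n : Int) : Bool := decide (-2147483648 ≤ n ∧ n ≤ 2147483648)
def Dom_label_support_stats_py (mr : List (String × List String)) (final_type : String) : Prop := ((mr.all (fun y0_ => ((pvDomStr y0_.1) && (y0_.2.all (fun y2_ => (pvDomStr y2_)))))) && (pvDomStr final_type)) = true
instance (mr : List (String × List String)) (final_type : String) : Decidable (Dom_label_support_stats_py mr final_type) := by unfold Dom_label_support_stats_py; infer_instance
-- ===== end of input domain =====

-- B replaces A's per-label scan over all 8 alias sets (nested loop with break, plus a separate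
-- support pass) by one reverse index alias → category and a single pass over the labels; objective: simpler.

-- ===== PORT A =====
-- the support_map literal of A
def pvSupportMap : List (String × List String) :=
  [("feature", ["feature", "enhancement"]),
   ("bugfix", ["bug", "bugfix", "fix", "defect", "hotfix"]),
   ("refactor", ["refactor", "cleanup"]),
   ("test-only", ["test", "tests"]),
   ("docs-only", ["docs", "documentation"]),
   ("chore", ["chore", "maintenance", "dependencies", "deps"]),
   ("perf-security", ["security", "perf", "performance", "snyk", "vulnerability"]),
   ("infra", ["infra", "platform", "devops", "sre"])]

-- the label normalisation both Pythons share verbatim: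
-- [str(l).strip().lower() for l in mr.get("labels", []) if str(l).strip()]
def pvLabels (mr : List (String × List String)) : List String :=
  (((mr.lookup "labels").getD []).filter (fun l => !(PySem.Str.strip l == ""))).map
    (fun l => PySem.Str.lower (PySem.Str.strip l))

def label_support_stats_py (mr : List (String × List String)) (final_type : String) : Int × Int :=
  let labels := pvLabels mr
  if labels = [] then (0, 0)
  else
    let support_aliases := (pvSupportMap.lookup final_type).getD []
    let support : Int := (labels.map (fun lbl => if lbl ∈ support_aliases then (1 : Int) else 0)).sum
    let conflict : Int := labels.foldl
      (fun c lbl => if pvSupportMap.any (fun p => !(p.1 == final_type) && p.2.contains lbl) then c + 1 else c) 0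
    (support, conflict)

-- ===== PORT B =====
-- reverse index alias → category ({alias: cat for cat, aliases in support_map.items() for alias in aliases})
def pvReverse : List (String × String) :=
  pvSupportMap.flatMap (fun p => p.2.map (fun a => (a, p.1)))

-- one loop body: look the label up once, bump support or conflict
def pvStepB (final_type : String) (acc : Int × Int) (lbl : String) : Int × Int :=
  match pvReverse.lookup lbl with
  | some cat => if cat = final_type then (acc.1 + 1, acc.2) else (acc.1, acc.2 + 1)
  | none => acc

def label_support_stats_py_alt (mr : List (String × List String)) (final_type : String) : Int × Int :=
  (pvLabels mr).foldl (pvStepB final_type) (0, 0)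

-- ===== PRECONDITION & SPEC =====
def Spec_label_support_stats_py (mr : List (String × List String)) (final_type : String) (out : Int × Int) : Prop := out = label_support_stats_py_alt mr final_type
instance (mr : List (String × List String)) (final_type : String) (out : Int × Int) : Decidable (Spec_label_support_stats_py mr final_type out) := by unfold Spec_label_support_stats_py; infer_instance

-- ===== CLAIM (what is proved, stated in full; the proofs are below) =====
def Claim_equal_label_support_stats_py : Prop := ∀ (mr : List (String × List String)) (final_type : String), Dom_label_support_stats_py mr final_type → Spec_label_support_stats_py mr final_type (label_support_stats_py mr final_type)

-- ===== LEMMAS AND PROOFS =====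

lemma lookup_ite {β : Type} (a k : String) (b : β) (es : List (String × β)) :
    List.lookup a ((k, b) :: es) = if a = k then some b else List.lookup a es := by
  rcases eq_or_ne a k with h | h
  · simp [List.lookup, h]
  · have hb : (a == k) = false := by simp [h]
    simp [List.lookup, hb, h]

lemma lookup_mem {β : Type} {l : List (String × β)} {a : String} {b : β}
    (h : l.lookup a = some b) : (a, b) ∈ l := by
  induction l with
  | nil => simp [List.lookup] at h
  | cons p t ih =>
    rcases p with ⟨k, v⟩
    rw [lookup_ite] at h
    split_ifs at h with hk
    · cases h; subst hk; simp
    · simp [ih h]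

lemma mem_lookup {β : Type} {l : List (String × β)}
    (hnd : (l.map Prod.fst).Nodup) {a : String} {b : β}
    (h : (a, b) ∈ l) : l.lookup a = some b := by
  induction l with
  | nil => simp at h
  | cons p t ih =>
    rcases p with ⟨k, v⟩
    simp only [List.map_cons, List.nodup_cons, List.mem_map] at hnd
    rw [lookup_ite]
    rcases List.mem_cons.1 h with h1 | h1
    · cases h1; simp
    · have hak : a ≠ k := by
        rintro rfl
        exact hnd.1 ⟨(a, b), h1, rfl⟩
      rw [if_neg hak]
      exact ih hnd.2 h1

lemma lookup_none_not_mem {β : Type} {l : List (String × β)} {a : String} {b : β}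
    (h : l.lookup a = none) : (a, b) ∉ l := by
  induction l with
  | nil => simp
  | cons p t ih =>
    rcases p with ⟨k, v⟩
    rw [lookup_ite] at h
    split_ifs at h with hk
    intro hmem
    rcases List.mem_cons.1 hmem with h1 | h1
    · exact hk (congrArg Prod.fst h1)
    · exact ih h h1

-- the alias sets of pvSupportMap are pairwise disjoint and its keys are distinct
lemma pvSupportMap_disjoint :
    ∀ p ∈ pvSupportMap, ∀ q ∈ pvSupportMap, p.1 ≠ q.1 → ∀ x ∈ p.2, x ∉ q.2 := by decide

lemma pvSupportMap_keys_nodup : (pvSupportMap.map Prod.fst).Nodup := by decide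

lemma rev_some {lbl cat : String} (h : pvReverse.lookup lbl = some cat) :
    ∃ al, (cat, al) ∈ pvSupportMap ∧ lbl ∈ al := by
  have hm := lookup_mem h
  simp only [pvReverse, List.mem_flatMap, List.mem_map] at hm
  obtain ⟨p, hp, a, ha, heq⟩ := hm
  obtain ⟨rfl, rfl⟩ := Prod.mk.injEq .. ▸ (Prod.ext_iff.1 heq)
  exact ⟨p.2, by simpa using hp, ha⟩

lemma rev_none {lbl : String} (h : pvReverse.lookup lbl = none) :
    ∀ p ∈ pvSupportMap, lbl ∉ p.2 := by
  intro p hp hm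
  exact lookup_none_not_mem h (by
    simp only [pvReverse, List.mem_flatMap, List.mem_map]
    exact ⟨p, hp, lbl, hm, rfl⟩)

-- A's two per-label tests, expressed through B's single reverse lookup
lemma step_eq (final_type lbl : String) (s c : Int) :
    pvStepB final_type (s, c) lbl
    = (s + (if lbl ∈ (pvSupportMap.lookup final_type).getD [] then (1 : Int) else 0),
       if pvSupportMap.any (fun p => !(p.1 == final_type) && p.2.contains lbl) then c + 1 else c) := by
  unfold pvStepB
  cases hr : pvReverse.lookup lbl with
  | none =>
    have hs : lbl ∉ (pvSupportMap.lookup final_type).getD [] := by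
      intro hmem
      cases hl : pvSupportMap.lookup final_type with
      | none => rw [hl] at hmem; simp at hmem
      | some al =>
        rw [hl] at hmem; simp only [Option.getD_some] at hmem
        exact rev_none hr _ (lookup_mem hl) hmem
    have hc : pvSupportMap.any (fun p => !(p.1 == final_type) && p.2.contains lbl) = false := by
      rw [List.any_eq_false]
      intro p hp hcontra
      rw [Bool.and_eq_true] at hcontra
      exact rev_none hr p hp (by simpa using hcontra.2)
    dsimp only
    rw [if_neg hs, hc]
    simp
  | some cat =>
    obtain ⟨al, hmem, hlbl⟩ := rev_some hr
    dsimp only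
    rcases eq_or_ne cat final_type with rfl | hne
    · have hs : lbl ∈ (pvSupportMap.lookup cat).getD [] := by
        rw [mem_lookup pvSupportMap_keys_nodup hmem]; simpa using hlbl
      have hc : pvSupportMap.any (fun p => !(p.1 == cat) && p.2.contains lbl) = false := by
        rw [List.any_eq_false]
        intro p hp hcontra
        rw [Bool.and_eq_true] at hcontra
        have h1 : p.1 ≠ cat := by simpa using hcontra.1
        exact pvSupportMap_disjoint _ hmem p hp (fun h => h1 h.symm) lbl hlbl
          (by simpa using hcontra.2)
      rw [if_pos rfl, if_pos hs, hc]
      simp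
    · have hs : lbl ∉ (pvSupportMap.lookup final_type).getD [] := by
        intro hmemf
        cases hl : pvSupportMap.lookup final_type with
        | none => rw [hl] at hmemf; simp at hmemf
        | some al' =>
          rw [hl] at hmemf; simp only [Option.getD_some] at hmemf
          exact pvSupportMap_disjoint _ hmem _ (lookup_mem hl) (by simpa using hne) lbl hlbl hmemf
      have hc : pvSupportMap.any (fun p => !(p.1 == final_type) && p.2.contains lbl) = true := by
        rw [List.any_eq_true]
        exact ⟨(cat, al), hmem, by simp [hne, hlbl]⟩
      rw [if_neg hne, if_neg hs, hc]
      simp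

-- B's single fold equals A's (support, conflict) pair, for any starting accumulators
lemma fold_eq (final_type : String) (labels : List String) :
    ∀ s c : Int,
      labels.foldl (pvStepB final_type) (s, c)
      = (s + (labels.map (fun lbl =>
            if lbl ∈ (pvSupportMap.lookup final_type).getD [] then (1 : Int) else 0)).sum,
         labels.foldl (fun c lbl =>
            if pvSupportMap.any (fun p => !(p.1 == final_type) && p.2.contains lbl) then c + 1 else c) c) := by
  induction labels with
  | nil => intro s c; simp
  | cons l t ih =>
    intro s c
    rw [List.foldl_cons, step_eq, ih]
    simp only [List.map_cons, List.sum_cons, List.foldl_cons, Prod.mk.injEq]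
    exact ⟨by ring, trivial⟩

-- ===== VERDICT (by name: the statement is the Claim_ definition above) =====
theorem label_support_stats_py_spec : Claim_equal_label_support_stats_py := by
  intro mr final_type _
  unfold Spec_label_support_stats_py label_support_stats_py label_support_stats_py_alt
  rcases heq : pvLabels mr with _ | ⟨l, t⟩
  · simp
  · dsimp only
    rw [if_neg (by simp), fold_eq]
    simp
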